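-- pv_equiv track=rewrite | github.com/afni/afni | src/python_scripts/afnipy/afni_base.py | find_all_non_var_curlys
-- ===== SOURCE A (Python) =====
-- def find_all_non_var_curlys(stext):
--    """return a
--    """
--    clist = []
--    start = 0
--    cind = stext.find('{', start)
--    while cind >= start:
--       # if preceded by '$', just ignore (okay if cind-1 == -1)
--       if cind == 0 or stext[cind-1] != '$':
--          # have found '{', and not preceded by '$'
--          clist.append(cind)
--       # and look for next
--       start = cind + 1
--       cind = stext.find('{', start)
--    return clist
-- ===== SOURCE B (Python) =====
-- def find_all_non_var_curlys(stext):
--    clist = []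
--    prev = None
--    for i, c in enumerate(stext):
--       if c == '{' and prev != '$':
--          clist.append(i)
--       prev = c
--    return clist
-- ===== Notes on version B (the rewrite author's own statement) =====
-- stated objective: alternative
-- what changed: Replaced the repeated str.find jump loop with a single left-to-right enumerate scan that tracks the previous character.
import Mathlib
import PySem

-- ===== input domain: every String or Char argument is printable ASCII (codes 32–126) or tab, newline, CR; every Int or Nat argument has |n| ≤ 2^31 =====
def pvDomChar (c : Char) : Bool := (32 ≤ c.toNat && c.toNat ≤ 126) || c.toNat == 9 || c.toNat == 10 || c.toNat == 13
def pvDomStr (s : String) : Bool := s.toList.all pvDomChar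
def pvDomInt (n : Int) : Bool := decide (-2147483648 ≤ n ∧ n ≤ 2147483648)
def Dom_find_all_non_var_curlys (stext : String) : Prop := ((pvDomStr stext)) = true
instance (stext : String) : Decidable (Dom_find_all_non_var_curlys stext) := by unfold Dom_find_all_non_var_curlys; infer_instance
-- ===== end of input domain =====

-- B replaces A's repeated str.find jump loop by a single left-to-right scan that tracks the previous character (alternative decomposition, same cost).

-- ===== PORT A =====
-- A's while loop, made total with a fuel bound (always sufficient; no behaviour change)
def pvALoop (s : List Char) (clist : List Int) (start : Int) : Nat → List Int
  | 0 => clist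
  | fuel + 1 =>
    let cind := PySem.Chars.findFrom s ['{'] start none
    if start ≤ cind then
      let clist' := if cind = 0 ∨ PySem.List.pyGet? s (cind - 1) ≠ some '$' then clist ++ [cind] else clist
      pvALoop s clist' (cind + 1) fuel
    else clist

def find_all_non_var_curlys (stext : String) : List Int :=
  pvALoop stext.toList [] 0 (stext.toList.length + 1)

-- ===== PORT B =====
-- for i, c in enumerate(stext): append i when c is '{' and the previous char is not '$'
def pvBLoop (cs : List Char) (prev : Option Char) (i : Nat) (clist : List Int) : List Int :=
  match cs with
  | [] => clist
  | c :: rest =>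
      pvBLoop rest (some c) (i + 1)
        (if c = '{' ∧ prev ≠ some '$' then clist ++ [(i : Int)] else clist)

def find_all_non_var_curlys_alt (stext : String) : List Int :=
  pvBLoop stext.toList none 0 []

-- ===== PRECONDITION & SPEC =====
def Spec_find_all_non_var_curlys (stext : String) (out : List Int) : Prop := out = find_all_non_var_curlys_alt stext
instance (stext : String) (out : List Int) : Decidable (Spec_find_all_non_var_curlys stext out) := by unfold Spec_find_all_non_var_curlys; infer_instance

-- ===== CLAIM (what is proved, stated in full; the proofs are below) =====
def Claim_equal_find_all_non_var_curlys : Prop := ∀ (stext : String), Dom_find_all_non_var_curlys stext → Spec_find_all_non_var_curlys stext (find_all_non_var_curlys stext)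

-- ===== LEMMAS AND PROOFS =====

-- the common specification: indices j ∈ [k, |s|) with s[j] = '{' and (j = 0 or s[j-1] ≠ '$')
def pvSpec (s : List Char) (k : Nat) : List Int :=
  ((List.range' k (s.length - k)).filter
    (fun j => (s[j]? == some '{') && (j == 0 || s[j-1]? != some '$'))).map (fun j => (j : Int))

lemma pvSpec_nil (s : List Char) (k : Nat) (h : ∀ j, k ≤ j → j < s.length → s[j]? ≠ some '{') :
    pvSpec s k = [] := by
  unfold pvSpec
  have hnil : (List.range' k (s.length - k)).filter
      (fun j => (s[j]? == some '{') && (j == 0 || s[j-1]? != some '$')) = [] := by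
    rw [List.filter_eq_nil_iff]
    intro j hj
    rw [List.mem_range'] at hj
    obtain ⟨i, hi, rfl⟩ := hj
    simp only [Bool.and_eq_true, beq_iff_eq]
    rintro ⟨h1, -⟩
    exact h _ (by omega) (by omega) h1
  simp [hnil]

lemma pvSpec_step (s : List Char) (k m : Nat) (hk : k ≤ m) (hm : m < s.length)
    (hmid : ∀ j, k ≤ j → j < m → s[j]? ≠ some '{') :
    pvSpec s k = (if (s[m]? == some '{') && (m == 0 || s[m-1]? != some '$') then [(m:Int)] else [])
      ++ pvSpec s (m+1) := by
  unfold pvSpec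
  have hsplit : s.length - k = (m - k) + (1 + (s.length - (m+1))) := by omega
  rw [hsplit, ← List.range'_append (s := k) (m := m - k) (n := 1 + (s.length - (m+1))) (step := 1)]
  have hkm : k + 1 * (m - k) = m := by omega
  rw [hkm]
  have h1 : List.range' m (1 + (s.length - (m+1))) 1 = m :: List.range' (m+1) (s.length - (m+1)) 1 := by
    rw [Nat.add_comm, List.range'_succ]
  rw [h1, List.filter_append, List.filter_cons]
  have hnil : (List.range' k (m - k)).filter
      (fun j => (s[j]? == some '{') && (j == 0 || s[j-1]? != some '$')) = [] := by
    rw [List.filter_eq_nil_iff]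
    intro j hj
    rw [List.mem_range'] at hj
    obtain ⟨i, hi, rfl⟩ := hj
    simp only [Bool.and_eq_true, beq_iff_eq]
    rintro ⟨hc, -⟩
    exact hmid _ (by omega) (by omega) hc
  rw [hnil, List.nil_append]
  by_cases hb : ((s[m]? == some '{') && (m == 0 || s[m-1]? != some '$')) = true
  · rw [if_pos hb, if_pos hb]; simp
  · rw [if_neg hb, if_neg hb]; simp

lemma pvALoop_spec (s : List Char) : ∀ fuel k acc, k ≤ s.length → s.length + 1 - k ≤ fuel →
    pvALoop s acc (k : Int) fuel = acc ++ pvSpec s k := by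
  intro fuel
  induction fuel with
  | zero => intro k acc h1 h2; omega
  | succ fuel ih =>
    intro k acc hk hf
    simp only [pvALoop]
    rw [PySem.Chars.findFrom_natCast s ['{'] k hk]
    by_cases hfind : PySem.Chars.find (s.drop k) ['{'] = -1
    · rw [if_pos hfind, if_neg (by omega : ¬ (k:Int) ≤ -1)]
      have hno : ¬ ['{'] <:+: s.drop k := (PySem.Chars.find_eq_neg_one_iff _ _).mp hfind
      rw [pvSpec_nil s k, List.append_nil]
      intro j hj1 hj2 hj3
      apply hno
      rw [List.singleton_infix_iff]
      have hjk : (s.drop k)[j - k]? = some '{' := by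
        rw [List.getElem?_drop]; rwa [show k + (j - k) = j by omega]
      exact List.mem_of_getElem? hjk
    · rw [if_neg hfind]
      set f := PySem.Chars.find (s.drop k) ['{'] with hfdef
      have hf0 : 0 ≤ f := by have := PySem.Chars.neg_one_le_find (s.drop k) ['{']; omega
      obtain ⟨hpre, hmin⟩ := PySem.Chars.find_spec (s := s.drop k) (sub := ['{']) hf0
      set m := k + f.toNat with hm
      rw [List.drop_drop] at hpre
      obtain ⟨t, ht⟩ := hpre
      have hmlen : m < s.length := by
        have := congrArg List.length ht
        simp [List.length_drop] at this
        omega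
      have hsm : s[m]? = some '{' := by
        have h0 : (s.drop m)[0]? = s[m + 0]? := List.getElem?_drop ..
        rw [← ht] at h0
        simpa using h0.symm
      have hcast : (k : Int) + f = (m : Int) := by
        rw [hm]; push_cast [Int.toNat_of_nonneg hf0]; ring
      rw [hcast, if_pos (by exact_mod_cast by omega : (k:Int) ≤ (m:Int))]
      -- branch condition ↔ boolean predicate at m
      have hiff : ((m : Int) = 0 ∨ PySem.List.pyGet? s ((m : Int) - 1) ≠ some '$') ↔
          ((s[m]? == some '{') && (m == 0 || s[m-1]? != some '$')) = true := by
        rcases Nat.eq_zero_or_pos m with h0 | h0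
        · simp only [h0] at hsm ⊢
          simp [hsm]
        · have h0' : m ≠ 0 := by omega
          have : ((m : Int) - 1) = ((m - 1 : Nat) : Int) := by omega
          rw [this, PySem.List.pyGet?_natCast]
          simp [h0', hsm, Int.natCast_eq_zero]
      have hmid : ∀ j, k ≤ j → j < m → s[j]? ≠ some '{' := by
        intro j hj1 hj2 hj3
        apply hmin (j - k) (by omega)
        rw [List.drop_drop, show k + (j - k) = j by omega]
        have hj' : j < s.length := by omega
        have hjc : s[j]'hj' = '{' := by
          have h := List.getElem?_eq_getElem (l := s) (i := j) hj'
          rw [hj3] at h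
          exact (Option.some.inj h).symm
        refine ⟨s.drop (j+1), ?_⟩
        rw [List.drop_eq_getElem_cons hj', hjc]
        rfl
      rw [show (m : Int) + 1 = ((m + 1 : Nat) : Int) by push_cast; ring]
      by_cases hcond : ((m : Int) = 0 ∨ PySem.List.pyGet? s ((m : Int) - 1) ≠ some '$')
      · rw [if_pos hcond, ih (m+1) _ (by omega) (by omega),
          pvSpec_step s k m (by omega) hmlen hmid, if_pos (hiff.mp hcond)]
        simp
      · rw [if_neg hcond, ih (m+1) _ (by omega) (by omega),
          pvSpec_step s k m (by omega) hmlen hmid,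
          if_neg (fun h => hcond (hiff.mpr h))]
        simp

lemma pvBLoop_spec (s : List Char) : ∀ n i acc, i ≤ s.length → n = s.length - i →
    pvBLoop (s.drop i) (if i = 0 then none else s[i-1]?) i acc = acc ++ pvSpec s i := by
  intro n
  induction n with
  | zero =>
    intro i acc hle hn
    have hi : i = s.length := by omega
    subst hi
    simp [pvBLoop, pvSpec]
  | succ n ih =>
    intro i acc hle hn
    have hi : i < s.length := by omega
    rw [List.drop_eq_getElem_cons hi]
    simp only [pvBLoop]
    rw [show (some s[i] : Option Char) = (if i+1 = 0 then none else s[(i+1)-1]?) from by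
      simp [List.getElem?_eq_getElem hi]]
    rw [ih (i+1) _ (by omega) (by omega)]
    have hsplit : s.length - i = n + 1 := by omega
    simp only [pvSpec, hsplit, List.range', List.filter_cons]
    have hn' : s.length - (i+1) = n := by omega
    rw [hn']
    have hgi : s[i]? = some s[i] := List.getElem?_eq_getElem hi
    have hiff : (s[i] = '{' ∧ (if i = 0 then none else s[i-1]?) ≠ some '$') ↔
        ((s[i]? == some '{') && (i == 0 || s[i-1]? != some '$')) = true := by
      rcases Nat.eq_zero_or_pos i with h0 | h0
      · subst h0; simp [hgi]
      · have h0' : i ≠ 0 := by omega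
        simp [h0', hgi]
    by_cases hb : ((s[i]? == some '{') && (i == 0 || s[i-1]? != some '$')) = true
    · rw [if_pos (hiff.mpr hb), if_pos hb]
      simp
    · rw [if_neg (fun h => hb (hiff.mp h)), if_neg hb]

-- ===== VERDICT (by name: the statement is the Claim_ definition above) =====
theorem find_all_non_var_curlys_spec : Claim_equal_find_all_non_var_curlys := by
  intro stext _
  unfold Spec_find_all_non_var_curlys find_all_non_var_curlys find_all_non_var_curlys_alt
  have hA := pvALoop_spec stext.toList (stext.toList.length + 1) 0 [] (Nat.zero_le _) (by omega)
  have hB := pvBLoop_spec stext.toList stext.toList.length 0 [] (Nat.zero_le _) rfl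
  simpa using hA.trans (by simpa using hB.symm)
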